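-- pv_equiv track=rewrite | github.com/davidask611/IA-personal | Clark.py | obtener_detalle_planta
-- ===== SOURCE A (Python) =====
-- def obtener_detalle_planta(tipo, seleccion, conocimientos):
--     seleccion = seleccion.lower()
--
--     if tipo == 'suculentas':
--         suculentas = conocimientos.get('planta', {}).get('suculentas', {})
--         for clave, info in suculentas.items():
--             if seleccion == info['nombre'].lower():
--                 return (f"{info['nombre']}:\n"
--                         f"{info.get('descripcion', 'Descripción no disponible')}.\n"
--                         f"Se debe regar cada {info.get('riego', 'frecuencia de riego no especificada')}.")
--         return "Lo siento, no tengo información sobre esa suculenta. Intenta reformular la pregunta."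
--
--     elif tipo == 'arboles':
--         arboles = conocimientos.get('planta', {}).get('arboles', {})
--         for clave, info in arboles.items():
--             if seleccion == info['nombre'].lower():
--                 return (f"{info['nombre']}:\n"
--                         f"Fruta: {info.get('fruta', 'No especificada')}.\n"
--                         f"Epoca: {info.get('epoca', 'No especificada')}.\n"  # Se mantiene la epoca aquí
--                         f"Altura máxima: {info.get('altura', 'Altura no especificada')} metros.")
--         return "Lo siento, no tengo información sobre ese árbol frutal. Intenta reformular la pregunta."
--
--     elif tipo == 'huerta':
--         huerta = conocimientos.get('planta', {}).get('huerta', {})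
--         for clave, info in huerta.items():
--             if seleccion == info['nombre'].lower():
--                 return (f"{info['nombre']}:\n"
--                         f"Descripción: {info.get('descripcion', 'Descripción no disponible')}.\n"
--                         f"Epoca: {info.get('epoca', 'epoca no disponible')}.\n"  # Se mantiene la epoca aquí
--                         f"Se debe regar cada {info.get('riego', 'frecuencia de riego no especificada')}.")
--         return "Lo siento, no tengo información sobre esa verdura. Intenta reformular la pregunta."
--
--     return "No se encontró información sobre la selección."
-- ===== SOURCE B (Python) =====
-- def _fmt_suculenta(info):
--     return (f"{info.get('nombre', '')}:\n"
--             f"{info.get('descripcion', 'Descripción no disponible')}.\n"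
--             f"Se debe regar cada {info.get('riego', 'frecuencia de riego no especificada')}.")
--
--
-- def _fmt_arbol(info):
--     return (f"{info.get('nombre', '')}:\n"
--             f"Fruta: {info.get('fruta', 'No especificada')}.\n"
--             f"Epoca: {info.get('epoca', 'No especificada')}.\n"
--             f"Altura máxima: {info.get('altura', 'Altura no especificada')} metros.")
--
--
-- def _fmt_huerta(info):
--     return (f"{info.get('nombre', '')}:\n"
--             f"Descripción: {info.get('descripcion', 'Descripción no disponible')}.\n"
--             f"Epoca: {info.get('epoca', 'epoca no disponible')}.\n"
--             f"Se debe regar cada {info.get('riego', 'frecuencia de riego no especificada')}.")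
--
--
-- _CATEGORIAS = [
--     ('suculentas', _fmt_suculenta,
--      "Lo siento, no tengo información sobre esa suculenta. Intenta reformular la pregunta."),
--     ('arboles', _fmt_arbol,
--      "Lo siento, no tengo información sobre ese árbol frutal. Intenta reformular la pregunta."),
--     ('huerta', _fmt_huerta,
--      "Lo siento, no tengo información sobre esa verdura. Intenta reformular la pregunta."),
-- ]
--
--
-- def obtener_detalle_planta(tipo, seleccion, conocimientos):
--     # Stage 1: build a complete index (categoria, nombre.lower()) -> formatted detail
--     # over ALL categories; setdefault keeps the first occurrence of a duplicate name.
--     plantas = conocimientos.get('planta', {})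
--     indice = {}
--     for cat, fmt, _ in _CATEGORIAS:
--         for info in plantas.get(cat, {}).values():
--             indice.setdefault((cat, info.get('nombre', '').lower()), fmt(info))
--     # Stage 2: one hash lookup.
--     for cat, _, no_encontrado in _CATEGORIAS:
--         if cat == tipo:
--             return indice.get((tipo, seleccion.lower()), no_encontrado)
--     return "No se encontró información sobre la selección."
-- ===== Notes on version B (the rewrite author's own statement) =====
-- stated objective: alternative
-- what changed: A branches on tipo and runs a linear scan of the chosen sub-dict inside each branch; B instead works in two stages: it first builds a complete index dict mapping (categoria, nombre.lower()) to the already-formatted detail string over ALL three categories (setdefault keeps the first occurrence, matching A's first-match rule), then answers with a single hash lookup, so no per-tipo scan loop remains.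
import Mathlib
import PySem

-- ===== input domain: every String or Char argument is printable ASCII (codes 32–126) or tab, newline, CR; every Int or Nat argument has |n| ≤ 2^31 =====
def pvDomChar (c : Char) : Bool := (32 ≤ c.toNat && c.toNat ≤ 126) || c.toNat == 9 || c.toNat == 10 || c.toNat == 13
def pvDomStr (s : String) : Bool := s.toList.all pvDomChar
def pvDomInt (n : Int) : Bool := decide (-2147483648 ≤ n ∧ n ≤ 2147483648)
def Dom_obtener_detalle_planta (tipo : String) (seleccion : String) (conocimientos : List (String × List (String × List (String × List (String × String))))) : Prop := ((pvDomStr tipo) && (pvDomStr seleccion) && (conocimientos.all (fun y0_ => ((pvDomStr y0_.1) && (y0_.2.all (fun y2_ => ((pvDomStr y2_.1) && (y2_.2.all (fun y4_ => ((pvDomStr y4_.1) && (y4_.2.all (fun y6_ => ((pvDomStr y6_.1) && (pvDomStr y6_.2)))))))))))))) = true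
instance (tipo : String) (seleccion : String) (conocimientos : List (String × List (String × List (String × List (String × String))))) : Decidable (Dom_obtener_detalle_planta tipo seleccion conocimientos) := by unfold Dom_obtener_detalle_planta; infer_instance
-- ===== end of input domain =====

-- B replaces A's branch-then-scan by two stages: it first builds a complete index dict
-- ((categoria, nombre.lower()) ↦ formatted detail) over ALL three categories with setdefault
-- (first occurrence wins), then answers with ONE dict lookup — alternative decomposition, same cost.

-- ===== PORT A =====
-- dict.get(k, d) on an association list, first match (A's conocimientos.get / info.get);
-- pvGetA info "nombre" "" also stands for info['nombre'], exact under Pre_ (the key is present there).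
def pvGetA {α : Type} (l : List (String × α)) (k : String) (d : α) : α :=
  match l with
  | [] => d
  | (k', v) :: rest => if k' == k then v else pvGetA rest k d

-- the 'for clave, info in suculentas.items(): …' loop of the first branch
def pvLoopSuc (s : String) : List (String × List (String × String)) → String
  | [] => "Lo siento, no tengo información sobre esa suculenta. Intenta reformular la pregunta."
  | (_, info) :: rest =>
    if s == PySem.Str.lower (pvGetA info "nombre" "") then
      pvGetA info "nombre" "" ++ ":\n" ++
      pvGetA info "descripcion" "Descripción no disponible" ++ ".\nSe debe regar cada " ++
      pvGetA info "riego" "frecuencia de riego no especificada" ++ "."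
    else pvLoopSuc s rest

-- the loop of the 'arboles' branch
def pvLoopArb (s : String) : List (String × List (String × String)) → String
  | [] => "Lo siento, no tengo información sobre ese árbol frutal. Intenta reformular la pregunta."
  | (_, info) :: rest =>
    if s == PySem.Str.lower (pvGetA info "nombre" "") then
      pvGetA info "nombre" "" ++ ":\nFruta: " ++
      pvGetA info "fruta" "No especificada" ++ ".\nEpoca: " ++
      pvGetA info "epoca" "No especificada" ++ ".\nAltura máxima: " ++
      pvGetA info "altura" "Altura no especificada" ++ " metros."
    else pvLoopArb s rest

-- the loop of the 'huerta' branch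
def pvLoopHue (s : String) : List (String × List (String × String)) → String
  | [] => "Lo siento, no tengo información sobre esa verdura. Intenta reformular la pregunta."
  | (_, info) :: rest =>
    if s == PySem.Str.lower (pvGetA info "nombre" "") then
      pvGetA info "nombre" "" ++ ":\nDescripción: " ++
      pvGetA info "descripcion" "Descripción no disponible" ++ ".\nEpoca: " ++
      pvGetA info "epoca" "epoca no disponible" ++ ".\nSe debe regar cada " ++
      pvGetA info "riego" "frecuencia de riego no especificada" ++ "."
    else pvLoopHue s rest

def obtener_detalle_planta (tipo : String) (seleccion : String) (conocimientos : List (String × List (String × List (String × List (String × String))))) : String :=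
  let s := PySem.Str.lower seleccion
  if tipo == "suculentas" then
    pvLoopSuc s (pvGetA (pvGetA conocimientos "planta" []) "suculentas" [])
  else if tipo == "arboles" then
    pvLoopArb s (pvGetA (pvGetA conocimientos "planta" []) "arboles" [])
  else if tipo == "huerta" then
    pvLoopHue s (pvGetA (pvGetA conocimientos "planta" []) "huerta" [])
  else "No se encontró información sobre la selección."

-- ===== PORT B =====
-- dict.get(k, d) as written in Source B: find? the first matching pair, project, default
def pvGetB {α : Type} (l : List (String × α)) (k : String) (d : α) : α :=
  ((l.find? (fun p => p.1 == k)).map Prod.snd).getD d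

def pvFmtSuc (info : List (String × String)) : String :=
  pvGetB info "nombre" "" ++ ":\n" ++
  pvGetB info "descripcion" "Descripción no disponible" ++ ".\nSe debe regar cada " ++
  pvGetB info "riego" "frecuencia de riego no especificada" ++ "."

def pvFmtArb (info : List (String × String)) : String :=
  pvGetB info "nombre" "" ++ ":\nFruta: " ++
  pvGetB info "fruta" "No especificada" ++ ".\nEpoca: " ++
  pvGetB info "epoca" "No especificada" ++ ".\nAltura máxima: " ++
  pvGetB info "altura" "Altura no especificada" ++ " metros."

def pvFmtHue (info : List (String × String)) : String :=
  pvGetB info "nombre" "" ++ ":\nDescripción: " ++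
  pvGetB info "descripcion" "Descripción no disponible" ++ ".\nEpoca: " ++
  pvGetB info "epoca" "epoca no disponible" ++ ".\nSe debe regar cada " ++
  pvGetB info "riego" "frecuencia de riego no especificada" ++ "."

-- _CATEGORIAS: (categoria, formatter, not-found message)
def pvCategorias : List (String × (List (String × String) → String) × String) :=
  [("suculentas", (pvFmtSuc,
     "Lo siento, no tengo información sobre esa suculenta. Intenta reformular la pregunta.")),
   ("arboles", (pvFmtArb,
     "Lo siento, no tengo información sobre ese árbol frutal. Intenta reformular la pregunta.")),
   ("huerta", (pvFmtHue,
     "Lo siento, no tengo información sobre esa verdura. Intenta reformular la pregunta."))]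

-- dict.setdefault on the association-list index: keep an existing binding, else append at the end
def pvSetdefault : List ((String × String) × String) → (String × String) → String → List ((String × String) × String)
  | [], k, v => [(k, v)]
  | p :: rest, k, v => if p.1 == k then p :: rest else p :: pvSetdefault rest k v

-- indice.get(k) (no default): first binding of k
def pvLook (d : List ((String × String) × String)) (k : String × String) : Option String :=
  (d.find? (fun p => p.1 == k)).map Prod.snd

-- the inner 'for info in plantas.get(cat, {}).values(): indice.setdefault(…)' loop
def pvBuildCat (cat : String) (fmt : List (String × String) → String)
    (infos : List (List (String × String))) (d : List ((String × String) × String)) : List ((String × String) × String) :=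
  infos.foldl (fun d info => pvSetdefault d (cat, PySem.Str.lower (pvGetB info "nombre" "")) (fmt info)) d

def obtener_detalle_planta_alt (tipo : String) (seleccion : String) (conocimientos : List (String × List (String × List (String × List (String × String))))) : String :=
  let plantas := pvGetB conocimientos "planta" []
  let indice := pvCategorias.foldl
    (fun d e => pvBuildCat e.1 e.2.1 ((pvGetB plantas e.1 []).map Prod.snd) d) []
  match pvCategorias.find? (fun e => e.1 == tipo) with
  | none => "No se encontró información sobre la selección."
  | some e =>
    match pvLook indice (tipo, PySem.Str.lower seleccion) with
    | some v => v
    | none => e.2.2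

-- ===== PRECONDITION & SPEC =====
-- Pre_ excludes inputs where, for a recognised tipo, some entry of the selected sub-dict lacks the
-- key 'nombre': A's info['nombre'] raises KeyError on such an entry unless a match occurs earlier in
-- the scan (that returning corner is cited in claim.json; B simply indexes such entries under '').
def Pre_obtener_detalle_planta (tipo : String) (seleccion : String) (conocimientos : List (String × List (String × List (String × List (String × String))))) : Prop :=
  (tipo = "suculentas" ∨ tipo = "arboles" ∨ tipo = "huerta") →
    ∀ r ∈ (((((conocimientos.find? (fun p => p.1 == "planta")).map Prod.snd).getD []).find?
              (fun q => q.1 == tipo)).map Prod.snd).getD [],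
      (r.2.find? (fun kv => kv.1 == "nombre")).isSome = true
instance (tipo : String) (seleccion : String) (conocimientos : List (String × List (String × List (String × List (String × String))))) : Decidable (Pre_obtener_detalle_planta tipo seleccion conocimientos) := by unfold Pre_obtener_detalle_planta; infer_instance

def pvWitness_obtener_detalle_planta : String × String × (List (String × List (String × List (String × List (String × String))))) :=
  ("suculentas", "rosa",
   [("planta", [("suculentas", [("r1", [("nombre", "Rosa"), ("riego", "3 dias")])])])])

def Spec_obtener_detalle_planta (tipo : String) (seleccion : String) (conocimientos : List (String × List (String × List (String × List (String × String))))) (out : String) : Prop := out = obtener_detalle_planta_alt tipo seleccion conocimientos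
instance (tipo : String) (seleccion : String) (conocimientos : List (String × List (String × List (String × List (String × String))))) (out : String) : Decidable (Spec_obtener_detalle_planta tipo seleccion conocimientos out) := by unfold Spec_obtener_detalle_planta; infer_instance

-- ===== CLAIM (what is proved, stated in full; the proofs are below) =====
def Claim_equal_obtener_detalle_planta : Prop := ∀ (tipo : String) (seleccion : String) (conocimientos : List (String × List (String × List (String × List (String × String))))), Dom_obtener_detalle_planta tipo seleccion conocimientos → Pre_obtener_detalle_planta tipo seleccion conocimientos → Spec_obtener_detalle_planta tipo seleccion conocimientos (obtener_detalle_planta tipo seleccion conocimientos)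

-- ===== LEMMAS AND PROOFS =====
theorem pvGetA_eq_pvGetB {α : Type} (l : List (String × α)) (k : String) (d : α) :
    pvGetA l k d = pvGetB l k d := by
  induction l with
  | nil => rfl
  | cons p rest ih =>
    obtain ⟨k', v⟩ := p
    simp only [pvGetA, pvGetB, List.find?]
    cases h : (k' == k) <;> simp [ih, pvGetB]

-- first-match over the infos of one category, as the index build will expose it
def pvFindCat (cat : String) (fmt : List (String × String) → String) (k : String × String) :
    List (List (String × String)) → Option String
  | [] => none
  | info :: rest =>
    if ((cat, PySem.Str.lower (pvGetB info "nombre" "")) == k) then some (fmt info)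
    else pvFindCat cat fmt k rest

theorem pvLook_setdefault (d : List ((String × String) × String)) (k' k : String × String) (v : String) :
    pvLook (pvSetdefault d k' v) k =
      match pvLook d k with
      | some w => some w
      | none => if k' == k then some v else none := by
  induction d with
  | nil => simp [pvSetdefault, pvLook, List.find?]
  | cons p rest ih =>
    simp only [pvSetdefault]
    by_cases h1 : p.1 = k'
    · rw [if_pos (by simpa using h1)]
      by_cases h2 : p.1 = k
      · simp [pvLook, List.find?, h2]
      · have hb : (p.1 == k) = false := beq_eq_false_iff_ne.mpr h2
        have hk : (k' == k) = false := by rw [← h1]; exact hb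
        simp only [pvLook, List.find?, hb, hk, if_false, Bool.false_eq_true]
        cases (List.find? (fun q => q.1 == k) rest).map Prod.snd <;> simp
    · rw [if_neg (by simpa using h1)]
      by_cases h2 : p.1 = k
      · simp [pvLook, List.find?, h2]
      · have hb : (p.1 == k) = false := beq_eq_false_iff_ne.mpr h2
        simp only [pvLook, List.find?, hb]
        exact ih

theorem pvLook_buildCat (cat : String) (fmt : List (String × String) → String)
    (infos : List (List (String × String))) (d : List ((String × String) × String)) (k : String × String) :
    pvLook (pvBuildCat cat fmt infos d) k =
      match pvLook d k with
      | some w => some w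
      | none => pvFindCat cat fmt k infos := by
  induction infos generalizing d with
  | nil => cases h : pvLook d k <;> simp [pvBuildCat, pvFindCat, h]
  | cons info rest ih =>
    simp only [pvBuildCat, List.foldl] at *
    rw [ih, pvLook_setdefault]
    cases h : pvLook d k with
    | some w => simp
    | none =>
      simp only [pvFindCat]
      cases ((cat, PySem.Str.lower (pvGetB info "nombre" "")) == k) <;> simp

theorem pvFindCat_ne (cat tipo : String) (h : (cat == tipo) = false)
    (fmt : List (String × String) → String) (s : String) (infos : List (List (String × String))) :
    pvFindCat cat fmt (tipo, s) infos = none := by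
  induction infos with
  | nil => rfl
  | cons info rest ih =>
    simp only [pvFindCat]
    rw [if_neg (by simp; intro e; simp [e] at h), ih]

-- A's scan of one category equals the first-match the index exposes, modulo formatting
theorem pvLoopSuc_eq (s : String) (items : List (String × List (String × String))) :
    pvLoopSuc s items =
      match pvFindCat "suculentas" pvFmtSuc ("suculentas", s) (items.map Prod.snd) with
      | some v => v
      | none => "Lo siento, no tengo información sobre esa suculenta. Intenta reformular la pregunta." := by
  induction items with
  | nil => rfl
  | cons p rest ih =>
    obtain ⟨k, info⟩ := p
    simp only [pvLoopSuc, List.map, pvFindCat]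
    rw [show ((("suculentas", PySem.Str.lower (pvGetB info "nombre" "")) : String × String) ==
          ("suculentas", s)) = (s == PySem.Str.lower (pvGetA info "nombre" "")) by
        rw [pvGetA_eq_pvGetB]
        by_cases hb : s = PySem.Str.lower (pvGetB info "nombre" "") <;> simp [hb, eq_comm]]
    cases (s == PySem.Str.lower (pvGetA info "nombre" "")) <;>
      simp [ih, pvFmtSuc, pvGetA_eq_pvGetB]

theorem pvLoopArb_eq (s : String) (items : List (String × List (String × String))) :
    pvLoopArb s items =
      match pvFindCat "arboles" pvFmtArb ("arboles", s) (items.map Prod.snd) with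
      | some v => v
      | none => "Lo siento, no tengo información sobre ese árbol frutal. Intenta reformular la pregunta." := by
  induction items with
  | nil => rfl
  | cons p rest ih =>
    obtain ⟨k, info⟩ := p
    simp only [pvLoopArb, List.map, pvFindCat]
    rw [show ((("arboles", PySem.Str.lower (pvGetB info "nombre" "")) : String × String) ==
          ("arboles", s)) = (s == PySem.Str.lower (pvGetA info "nombre" "")) by
        rw [pvGetA_eq_pvGetB]
        by_cases hb : s = PySem.Str.lower (pvGetB info "nombre" "") <;> simp [hb, eq_comm]]
    cases (s == PySem.Str.lower (pvGetA info "nombre" "")) <;>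
      simp [ih, pvFmtArb, pvGetA_eq_pvGetB]

theorem pvLoopHue_eq (s : String) (items : List (String × List (String × String))) :
    pvLoopHue s items =
      match pvFindCat "huerta" pvFmtHue ("huerta", s) (items.map Prod.snd) with
      | some v => v
      | none => "Lo siento, no tengo información sobre esa verdura. Intenta reformular la pregunta." := by
  induction items with
  | nil => rfl
  | cons p rest ih =>
    obtain ⟨k, info⟩ := p
    simp only [pvLoopHue, List.map, pvFindCat]
    rw [show ((("huerta", PySem.Str.lower (pvGetB info "nombre" "")) : String × String) ==
          ("huerta", s)) = (s == PySem.Str.lower (pvGetA info "nombre" "")) by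
        rw [pvGetA_eq_pvGetB]
        by_cases hb : s = PySem.Str.lower (pvGetB info "nombre" "") <;> simp [hb, eq_comm]]
    cases (s == PySem.Str.lower (pvGetA info "nombre" "")) <;>
      simp [ih, pvFmtHue, pvGetA_eq_pvGetB]

-- the full index lookup, tipo a recognised category, in terms of that category's first-match
theorem pvLook_indice (plantas : List (String × List (String × List (String × String)))) (tipo s : String)
    (h : tipo = "suculentas" ∨ tipo = "arboles" ∨ tipo = "huerta") :
    pvLook (pvCategorias.foldl
      (fun d e => pvBuildCat e.1 e.2.1 ((pvGetB plantas e.1 []).map Prod.snd) d) []) (tipo, s) =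
      (if tipo = "suculentas" then
        pvFindCat "suculentas" pvFmtSuc (tipo, s) ((pvGetB plantas "suculentas" []).map Prod.snd)
       else if tipo = "arboles" then
        pvFindCat "arboles" pvFmtArb (tipo, s) ((pvGetB plantas "arboles" []).map Prod.snd)
       else
        pvFindCat "huerta" pvFmtHue (tipo, s) ((pvGetB plantas "huerta" []).map Prod.snd)) := by
  simp only [pvCategorias, List.foldl]
  rw [pvLook_buildCat, pvLook_buildCat, pvLook_buildCat]
  have hnil : pvLook [] (tipo, s) = none := rfl
  rw [hnil]
  rcases h with h | h | h <;> subst h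
  · rw [pvFindCat_ne "arboles" "suculentas" (by decide),
        pvFindCat_ne "huerta" "suculentas" (by decide)]
    cases pvFindCat "suculentas" pvFmtSuc ("suculentas", s)
        ((pvGetB plantas "suculentas" []).map Prod.snd) <;> simp
  · rw [pvFindCat_ne "suculentas" "arboles" (by decide),
        pvFindCat_ne "huerta" "arboles" (by decide)]
    cases pvFindCat "arboles" pvFmtArb ("arboles", s)
        ((pvGetB plantas "arboles" []).map Prod.snd) <;> simp
  · rw [pvFindCat_ne "suculentas" "huerta" (by decide),
        pvFindCat_ne "arboles" "huerta" (by decide)]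
    cases pvFindCat "huerta" pvFmtHue ("huerta", s)
        ((pvGetB plantas "huerta" []).map Prod.snd) <;> simp

-- ===== VERDICT (by name: the statement is the Claim_ definition above) =====
theorem obtener_detalle_planta_spec : Claim_equal_obtener_detalle_planta := by
  intro tipo seleccion conocimientos _hdom _hpre
  unfold Spec_obtener_detalle_planta obtener_detalle_planta obtener_detalle_planta_alt
  by_cases h1 : tipo = "suculentas"
  · subst h1
    have hli := pvLook_indice (pvGetB conocimientos "planta" []) "suculentas"
      (PySem.Str.lower seleccion) (Or.inl rfl)
    simp only [pvCategorias, List.foldl] at hli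
    simp [pvCategorias, hli, pvLoopSuc_eq, pvGetA_eq_pvGetB]
  · by_cases h2 : tipo = "arboles"
    · subst h2
      have hli := pvLook_indice (pvGetB conocimientos "planta" []) "arboles"
        (PySem.Str.lower seleccion) (Or.inr (Or.inl rfl))
      simp only [pvCategorias, List.foldl] at hli
      simp [pvCategorias, List.find?, hli, pvLoopArb_eq, pvGetA_eq_pvGetB]
    · by_cases h3 : tipo = "huerta"
      · subst h3
        have hli := pvLook_indice (pvGetB conocimientos "planta" []) "huerta"
          (PySem.Str.lower seleccion) (Or.inr (Or.inr rfl))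
        simp only [pvCategorias, List.foldl] at hli
        simp [pvCategorias, List.find?, hli, pvLoopHue_eq, pvGetA_eq_pvGetB]
      · have e1 : ("suculentas" == tipo) = false := beq_eq_false_iff_ne.mpr (Ne.symm h1)
        have e2 : ("arboles" == tipo) = false := beq_eq_false_iff_ne.mpr (Ne.symm h2)
        have e3 : ("huerta" == tipo) = false := beq_eq_false_iff_ne.mpr (Ne.symm h3)
        simp [pvCategorias, List.find?, h1, h2, h3, e1, e2, e3]
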